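-- pv_equiv track=rewrite | github.com/duckwilly/finance | scripts/name_data.py | _list_from_block
-- ===== SOURCE A (Python) =====
-- def _list_from_block(block: str) -> list[str]:
--     """Turn a newline separated text block into a list of unique entries."""
--
--     seen: set[str] = set()
--     values: list[str] = []
--     for raw in block.splitlines():
--         item = raw.strip()
--         if not item or item.startswith("#"):
--             continue
--         if item in seen:
--             continue
--         seen.add(item)
--         values.append(item)
--     return values
-- ===== SOURCE B (Python) =====
-- def _list_from_block(block: str) -> list[str]:
--     """Turn a newline separated text block into a list of unique entries."""
--
--     def go(lines: list[str]) -> list[str]: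
--         if not lines:
--             return []
--         item = lines[0].strip()
--         if not item or item.startswith("#"):
--             return go(lines[1:])
--         return [item] + [x for x in go(lines[1:]) if x != item]
--
--     return go(block.splitlines())
-- ===== Notes on version B (the rewrite author's own statement) =====
-- stated objective: alternative
-- what changed: Replaces the single forward loop with a seen-set by a structural recursion over the lines that keeps no state at all: each clean line is prepended and its later duplicates are removed from the recursive result by filtering.
import Mathlib
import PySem

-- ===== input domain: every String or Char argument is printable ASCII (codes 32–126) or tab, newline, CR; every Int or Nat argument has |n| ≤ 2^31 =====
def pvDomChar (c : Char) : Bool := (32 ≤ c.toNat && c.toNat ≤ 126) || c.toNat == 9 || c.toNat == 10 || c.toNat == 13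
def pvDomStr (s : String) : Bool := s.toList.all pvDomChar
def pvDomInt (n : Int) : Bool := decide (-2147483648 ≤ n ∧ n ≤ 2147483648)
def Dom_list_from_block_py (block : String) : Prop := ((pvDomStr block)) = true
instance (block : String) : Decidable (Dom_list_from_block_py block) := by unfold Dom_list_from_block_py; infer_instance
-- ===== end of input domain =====

-- B is an alternative decomposition: a stateless structural recursion over the lines that
-- removes later duplicates of each kept line from the recursive result, instead of A's
-- forward loop carrying a seen-set; same return value.

-- ===== PORT A =====
def list_from_block_py (block : String) : List String :=
  (((PySem.Str.splitlines block).foldl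
    (fun (st : PySem.Set String × List String) (raw : String) =>
      if PySem.Str.strip raw = "" ∨ PySem.Str.startswith (PySem.Str.strip raw) "#" = true then st
      else if PySem.Set.contains st.1 (PySem.Str.strip raw) then st
      else (PySem.Set.add st.1 (PySem.Str.strip raw), st.2 ++ [PySem.Str.strip raw]))
    (PySem.Set.empty, []))).2

-- ===== PORT B =====
-- port of Source B's inner recursive helper `go`
def list_from_block_go : List String → List String
  | [] => []
  | raw :: rest =>
    if PySem.Str.strip raw = "" ∨ PySem.Str.startswith (PySem.Str.strip raw) "#" = true then
      list_from_block_go rest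
    else
      PySem.Str.strip raw ::
        (list_from_block_go rest).filter (fun x => x != PySem.Str.strip raw)

def list_from_block_py_alt (block : String) : List String :=
  list_from_block_go (PySem.Str.splitlines block)

-- ===== PRECONDITION & SPEC =====
def Spec_list_from_block_py (block : String) (out : List String) : Prop := out = list_from_block_py_alt block
instance (block : String) (out : List String) : Decidable (Spec_list_from_block_py block out) := by unfold Spec_list_from_block_py; infer_instance

-- ===== CLAIM =====
def Claim_equal_list_from_block_py : Prop := ∀ (block : String), Dom_list_from_block_py block → Spec_list_from_block_py block (list_from_block_py block)

-- ===== LEMMAS AND PROOFS =====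

-- A's fold from state (s, acc) appends exactly B's recursion result with the
-- elements already in s filtered out.
theorem pv_fold_eq_go (l : List String) (s : PySem.Set String) (acc : List String) :
    (l.foldl
      (fun (st : PySem.Set String × List String) (raw : String) =>
        if PySem.Str.strip raw = "" ∨ PySem.Str.startswith (PySem.Str.strip raw) "#" = true then st
        else if PySem.Set.contains st.1 (PySem.Str.strip raw) then st
        else (PySem.Set.add st.1 (PySem.Str.strip raw), st.2 ++ [PySem.Str.strip raw]))
      (s, acc)).2
    = acc ++ (list_from_block_go l).filter (fun x => !(PySem.Set.contains s x)) := by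
  induction l generalizing s acc with
  | nil => simp [list_from_block_go]
  | cons raw rest ih =>
    simp only [List.foldl_cons, list_from_block_go]
    by_cases h1 : PySem.Str.strip raw = "" ∨ PySem.Str.startswith (PySem.Str.strip raw) "#" = true
    · rw [if_pos h1, if_pos h1]
      exact ih s acc
    · rw [if_neg h1, if_neg h1]
      by_cases hc : PySem.Set.contains s (PySem.Str.strip raw) = true
      · have hm : PySem.Str.strip raw ∈ s := by simpa using hc
        rw [if_pos hc]
        rw [ih s acc, List.filter_cons]
        have : (!(PySem.Set.contains s (PySem.Str.strip raw))) = false := by simp [hm]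
        rw [this]
        simp only [Bool.false_eq_true, if_false, List.filter_filter]
        congr 1
        apply List.filter_congr
        intro x _
        by_cases hx : x = PySem.Str.strip raw
        · subst hx; simp [hm]
        · simp [hx]
      · have hm : PySem.Str.strip raw ∉ s := by simpa using hc
        rw [if_neg hc]
        rw [ih (PySem.Set.add s (PySem.Str.strip raw)) (acc ++ [PySem.Str.strip raw])]
        rw [List.filter_cons]
        have hnc : (!(PySem.Set.contains s (PySem.Str.strip raw))) = true := by simp [hm]
        rw [hnc]
        simp only [if_true, List.append_assoc, List.cons_append, List.nil_append]
        congr 2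
        rw [List.filter_filter]
        apply List.filter_congr
        intro x _
        have hadd : PySem.Set.add s (PySem.Str.strip raw) = s ++ [PySem.Str.strip raw] := by
          simp only [PySem.Set.add]
          rw [if_neg hc]
        rw [hadd]
        by_cases hx : x = PySem.Str.strip raw
        · subst hx; simp [PySem.Set.contains]
        · simp [PySem.Set.contains, hx]

-- ===== VERDICT =====
theorem list_from_block_py_spec : Claim_equal_list_from_block_py := by
  intro block _
  show list_from_block_py block = list_from_block_py_alt block
  unfold list_from_block_py list_from_block_py_alt
  rw [pv_fold_eq_go (PySem.Str.splitlines block) PySem.Set.empty []]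
  simp [PySem.Set.empty, PySem.Set.contains]
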